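-- pv_equiv track=rewrite | github.com/ykevingrox/alphaLAB | src/biotech_alpha/watchlist.py | _optional_value_counts
-- ===== SOURCE A (Python) =====
-- from typing import Any
--
-- def _optional_value_counts(values: Any) -> dict[str, int]:
--     counts: dict[str, int] = {}
--     for value in values:
--         if not isinstance(value, str) or not value.strip():
--             continue
--         key = _normalize_group_value(value)
--         counts[key] = counts.get(key, 0) + 1
--     return counts
--
-- def _normalize_group_value(value: str) -> str:
--     return " ".join(value.casefold().split())
-- ===== SOURCE B (Python) =====
-- def _optional_value_counts(values):
--     # different algorithm: no running tally at all — dedup the normalized keys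
--     # in first-occurrence order, then count each distinct key with list.count
--     keys = [_normalize_group_value(v) for v in values
--             if isinstance(v, str) and v.strip()]
--     seen = []
--     for k in keys:
--         if k not in seen:
--             seen.append(k)
--     return {k: keys.count(k) for k in seen}
--
-- def _normalize_group_value(value: str) -> str:
--     return " ".join(value.casefold().split())
-- ===== Notes on version B (the rewrite author's own statement) =====
-- stated objective: alternative
-- what changed: Drops the incremental dict tally entirely: B collects the normalized keys, deduplicates them in first-occurrence order with a membership list, and counts each distinct key with a separate keys.count scan (nested-scan brute force, O(n*d), instead of A's single-pass hash tally).
import Mathlib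
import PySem

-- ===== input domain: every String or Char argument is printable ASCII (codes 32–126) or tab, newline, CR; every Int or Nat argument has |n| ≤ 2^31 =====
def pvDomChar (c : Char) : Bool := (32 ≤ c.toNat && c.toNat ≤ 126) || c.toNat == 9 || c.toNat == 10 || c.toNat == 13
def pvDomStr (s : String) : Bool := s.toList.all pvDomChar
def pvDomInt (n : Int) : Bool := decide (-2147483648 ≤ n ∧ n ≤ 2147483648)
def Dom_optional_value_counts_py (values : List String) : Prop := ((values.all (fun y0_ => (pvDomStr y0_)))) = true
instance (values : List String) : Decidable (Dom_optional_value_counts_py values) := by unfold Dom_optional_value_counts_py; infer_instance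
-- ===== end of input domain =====

-- ===== PORT A =====
-- A tallies into a dict with get-default inside the filter loop; B has no running tally:
-- it dedups the normalized keys in first-occurrence order and counts each distinct key
-- with a separate list.count scan (alternative algorithm, not faster).
-- shared helper: _normalize_group_value(value) = " ".join(value.casefold().split())
-- (casefold ported as PySem.Str.lower: exact on the printable-ASCII domain Dom_)
def pvNormalize (value : String) : String :=
  PySem.Str.join " " (PySem.Str.split₀ (PySem.Str.lower value))

def optional_value_counts_py (values : List String) : List (String × Int) :=
  (values.foldl (fun counts value =>
      if PySem.Str.strip value == "" then counts
      else
        let key := pvNormalize value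
        counts.insert key (counts.getD key 0 + 1))
    PySem.Dict.empty).items

-- ===== PORT B =====
def optional_value_counts_py_alt (values : List String) : List (String × Int) :=
  let keys := values.filterMap (fun v =>
    if PySem.Str.strip v == "" then none else some (pvNormalize v))
  -- 'for k in keys: if k not in seen: seen.append(k)' = the first-occurrence set of keys
  let seen : PySem.Set String := keys.foldl (fun s k => PySem.Set.add s k) PySem.Set.empty
  -- {k: keys.count(k) for k in seen}
  seen.map (fun k => (k, (keys.count k : Int)))

-- ===== PRECONDITION & SPEC =====
def Spec_optional_value_counts_py (values : List String) (out : List (String × Int)) : Prop := out = optional_value_counts_py_alt values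
instance (values : List String) (out : List (String × Int)) : Decidable (Spec_optional_value_counts_py values out) := by unfold Spec_optional_value_counts_py; infer_instance

-- ===== CLAIM =====
def Claim_equal_optional_value_counts_py : Prop := ∀ (values : List String), Dom_optional_value_counts_py values → Spec_optional_value_counts_py values (optional_value_counts_py values)

-- ===== LEMMAS AND PROOFS =====

-- A's tallying loop, pushed through List.foldl_filterMap, is the Counter of the key list.
theorem pvFoldA_eq_counter (values : List String) :
    values.foldl (fun counts value =>
      if PySem.Str.strip value == "" then counts
      else counts.insert (pvNormalize value) (counts.getD (pvNormalize value) 0 + 1))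
      PySem.Dict.empty
    = PySem.Dict.counter (values.filterMap (fun v =>
        if PySem.Str.strip v == "" then none else some (pvNormalize v))) := by
  rw [← PySem.Dict.foldl_insert_getD_add_one_eq_counter, List.foldl_filterMap]
  congr 1
  funext d v
  by_cases h : PySem.Str.strip v == "" <;> simp [h]

-- ===== VERDICT =====
theorem optional_value_counts_py_spec : Claim_equal_optional_value_counts_py := by
  intro values _
  show optional_value_counts_py values = optional_value_counts_py_alt values
  simp only [optional_value_counts_py, optional_value_counts_py_alt]
  rw [pvFoldA_eq_counter, PySem.Dict.items_counter]; rfl
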